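-- pv_equiv track=rewrite | github.com/ashmoonori-afk/agent_factory | factory/registries/loader.py | _parse_skill_frontmatter
-- ===== SOURCE A (Python) =====
-- _POLICY_TAG = "Level:"
--
-- def _parse_skill_frontmatter(skill_id: str, content: str) -> dict[str, str]:
--     """Extract id, name, description, and policy from .md content.
--
--     The format expected is:
--         # Skill: <Display Name>
--         ## When to Use
--         <description lines>
--         ## Policy
--         Level: <DENY|ASK|ALLOW>
--     """
--     name = skill_id  # fallback
--     description = ""
--     policy = "ALLOW"  # fallback
--
--     lines = content.splitlines()
--     in_when_to_use = False
--     desc_lines: list[str] = []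
--
--     for line in lines:
--         stripped = line.strip()
--
--         # Title line: # Skill: Display Name
--         if stripped.startswith("# Skill:"):
--             name = stripped[len("# Skill:"):].strip()
--             in_when_to_use = False
--
--         # Section headers
--         elif stripped.startswith("## When to Use"):
--             in_when_to_use = True
--
--         elif stripped.startswith("##"):
--             in_when_to_use = False
--
--         # Collect "When to Use" body as description
--         elif in_when_to_use and stripped:
--             desc_lines.append(stripped)
--
--         # Policy level line
--         elif stripped.startswith(_POLICY_TAG):
--             policy = stripped[len(_POLICY_TAG):].strip().split()[0].upper()
--
--     description = " ".join(desc_lines)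
--
--     return {
--         "id": skill_id,
--         "name": name,
--         "description": description,
--         "policy": policy,
--     }
-- ===== SOURCE B (Python) =====
-- _POLICY_TAG = "Level:"
--
-- def _parse_skill_frontmatter(skill_id: str, content: str) -> dict[str, str]:
--     # Pass 1: bucket stripped lines into segments by the section header in effect.
--     titles: list[str] = []                     # texts of '# Skill:' title lines, in order
--     segments: list[tuple[bool, list[str]]] = []  # (is_when_to_use, body lines)
--     kind = False
--     body: list[str] = []
--     for raw in content.splitlines():
--         s = raw.strip()
--         if s.startswith("# Skill:"):
--             titles.append(s[len("# Skill:"):].strip())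
--             segments.append((kind, body))
--             kind, body = False, []
--         elif s.startswith("## When to Use"):
--             segments.append((kind, body))
--             kind, body = True, []
--         elif s.startswith("##"):
--             segments.append((kind, body))
--             kind, body = False, []
--         elif s:
--             body.append(s)
--     segments.append((kind, body))
--
--     # Pass 2: extract each field from the bucketed structure.
--     name = titles[-1] if titles else skill_id
--     description = " ".join(l for k, b in segments if k for l in b)
--     policy = "ALLOW"
--     for k, b in segments:
--         if not k:
--             for l in b:
--                 if l.startswith(_POLICY_TAG):
--                     policy = l[len(_POLICY_TAG):].strip().split()[0].upper()
--
--     return {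
--         "id": skill_id,
--         "name": name,
--         "description": description,
--         "policy": policy,
--     }
-- ===== Notes on version B (the rewrite author's own statement) =====
-- stated objective: alternative
-- what changed: Replaces A's single stateful loop (mode flag plus three running result variables mutated in-line) by a two-phase decomposition: pass 1 buckets stripped lines into header-delimited segments tagged When-to-Use or not, pass 2 extracts name (last title), description (join of When-to-Use bodies) and policy (last Level: line in a non-When-to-Use body) from that structure.
import Mathlib
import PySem

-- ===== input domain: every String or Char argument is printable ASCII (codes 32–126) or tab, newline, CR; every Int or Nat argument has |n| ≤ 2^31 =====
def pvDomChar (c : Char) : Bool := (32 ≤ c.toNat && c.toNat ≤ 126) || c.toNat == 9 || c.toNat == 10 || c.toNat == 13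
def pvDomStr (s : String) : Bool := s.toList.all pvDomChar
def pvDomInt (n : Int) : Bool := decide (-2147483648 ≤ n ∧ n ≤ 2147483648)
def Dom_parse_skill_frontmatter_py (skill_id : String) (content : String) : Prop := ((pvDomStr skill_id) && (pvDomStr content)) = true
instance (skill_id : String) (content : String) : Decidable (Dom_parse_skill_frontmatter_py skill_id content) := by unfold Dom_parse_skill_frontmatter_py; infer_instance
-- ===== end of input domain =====

-- B re-decomposes A's single stateful loop into two phases (bucket lines into header-delimited
-- segments, then extract name/description/policy from that structure); same O(n) cost, no speed claim.

-- ===== PORT A =====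
-- loop state: (name, in_when_to_use, desc_lines, policy)
def pvAStep (st : String × Bool × List String × String) (line : String) :
    String × Bool × List String × String :=
  let s := PySem.Str.strip line
  if PySem.Str.startswith s "# Skill:" then
    (PySem.Str.strip (PySem.Str.slice s (some 8) none), false, st.2.2.1, st.2.2.2)
  else if PySem.Str.startswith s "## When to Use" then
    (st.1, true, st.2.2.1, st.2.2.2)
  else if PySem.Str.startswith s "##" then
    (st.1, false, st.2.2.1, st.2.2.2)
  else if st.2.1 && !(s == "") then
    (st.1, st.2.1, st.2.2.1 ++ [s], st.2.2.2)
  else if PySem.Str.startswith s "Level:" then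
    -- stripped[6:].strip().split()[0].upper(); split()=[] is Python's IndexError (outside Pre_)
    match PySem.Str.split₀ (PySem.Str.strip (PySem.Str.slice s (some 6) none)) with
    | [] => st
    | t :: _ => (st.1, st.2.1, st.2.2.1, PySem.Str.upper t)
  else st

def parse_skill_frontmatter_py (skill_id : String) (content : String) : List (String × String) :=
  let st := (PySem.Str.splitlines content).foldl pvAStep (skill_id, false, [], "ALLOW")
  [("id", skill_id), ("name", st.1),
   ("description", PySem.Str.join " " st.2.2.1), ("policy", st.2.2.2)]

-- ===== PORT B =====
-- pass-1 state: (titles, kind, body, segments); kind = current section is a When-to-Use section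
def pvBStep (st : List String × Bool × List String × List (Bool × List String)) (line : String) :
    List String × Bool × List String × List (Bool × List String) :=
  let s := PySem.Str.strip line
  if PySem.Str.startswith s "# Skill:" then
    (st.1 ++ [PySem.Str.strip (PySem.Str.slice s (some 8) none)], false, [], st.2.2.2 ++ [(st.2.1, st.2.2.1)])
  else if PySem.Str.startswith s "## When to Use" then
    (st.1, true, [], st.2.2.2 ++ [(st.2.1, st.2.2.1)])
  else if PySem.Str.startswith s "##" then
    (st.1, false, [], st.2.2.2 ++ [(st.2.1, st.2.2.1)])
  else if !(s == "") then
    (st.1, st.2.1, st.2.2.1 ++ [s], st.2.2.2)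
  else st

-- l[len("Level:"):].strip().split()[0].upper(); split()=[] is Python's IndexError (outside Pre_)
def pvPolLine (p : String) (l : String) : String :=
  if PySem.Str.startswith l "Level:" then
    match PySem.Str.split₀ (PySem.Str.strip (PySem.Str.slice l (some 6) none)) with
    | [] => p
    | t :: _ => PySem.Str.upper t
  else p

def pvPolSeg (p : String) (seg : Bool × List String) : String :=
  if seg.1 then p else seg.2.foldl pvPolLine p

def parse_skill_frontmatter_py_alt (skill_id : String) (content : String) : List (String × String) :=
  let st := (PySem.Str.splitlines content).foldl pvBStep ([], false, [], [])
  let segs := st.2.2.2 ++ [(st.2.1, st.2.2.1)]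
  let name := st.1.getLast?.getD skill_id
  let desc := PySem.Str.join " " (segs.flatMap (fun seg => if seg.1 then seg.2 else []))
  let policy := segs.foldl pvPolSeg "ALLOW"
  [("id", skill_id), ("name", name), ("description", desc), ("policy", policy)]

-- ===== PRECONDITION & SPEC =====
-- Pre_ excludes contents with a line whose stripped form starts with "Level:" followed by nothing
-- (whitespace only): outside a When-to-Use section A raises IndexError (split()[0] on []) there; for
-- a closed form the condition also drops such bare lines inside When-to-Use sections, where A returns
-- the line as description text (slightly narrower than A's raise set; see the cite).
def Pre_parse_skill_frontmatter_py (skill_id : String) (content : String) : Prop :=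
  ∀ l ∈ PySem.Str.splitlines content,
    ¬ (PySem.Str.startswith (PySem.Str.strip l) "Level:" = true ∧
       PySem.Str.strip (PySem.Str.slice (PySem.Str.strip l) (some 6) none) = "")
instance (skill_id : String) (content : String) : Decidable (Pre_parse_skill_frontmatter_py skill_id content) := by unfold Pre_parse_skill_frontmatter_py; infer_instance

def pvWitness_parse_skill_frontmatter_py : String × String :=
  ("sid", "# Skill: Demo\n## When to Use\nwhen you demo\n\n## Policy\nLevel: ask now")

def Spec_parse_skill_frontmatter_py (skill_id : String) (content : String) (out : List (String × String)) : Prop := out = parse_skill_frontmatter_py_alt skill_id content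
instance (skill_id : String) (content : String) (out : List (String × String)) : Decidable (Spec_parse_skill_frontmatter_py skill_id content out) := by unfold Spec_parse_skill_frontmatter_py; infer_instance

-- ===== CLAIM (what is proved, stated in full; the proofs are below) =====
def Claim_equal_parse_skill_frontmatter_py : Prop := ∀ (skill_id : String) (content : String), Dom_parse_skill_frontmatter_py skill_id content → Pre_parse_skill_frontmatter_py skill_id content → Spec_parse_skill_frontmatter_py skill_id content (parse_skill_frontmatter_py skill_id content)

-- ===== LEMMAS AND PROOFS =====

def pvDesc (ss : List (Bool × List String)) : List String :=
  ss.flatMap (fun seg => if seg.1 then seg.2 else [])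

-- step lemmas for A's loop body, one per branch of the if-chain
theorem pvAStep_skill (n : String) (k : Bool) (d : List String) (p l : String)
    (h1 : PySem.Str.startswith (PySem.Str.strip l) "# Skill:" = true) :
    pvAStep (n, k, d, p) l =
      (PySem.Str.strip (PySem.Str.slice (PySem.Str.strip l) (some 8) none), false, d, p) := by
  unfold pvAStep; rw [if_pos h1]

theorem pvAStep_when (n : String) (k : Bool) (d : List String) (p l : String)
    (h1 : ¬ PySem.Str.startswith (PySem.Str.strip l) "# Skill:" = true)
    (h2 : PySem.Str.startswith (PySem.Str.strip l) "## When to Use" = true) :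
    pvAStep (n, k, d, p) l = (n, true, d, p) := by
  unfold pvAStep; rw [if_neg h1, if_pos h2]

theorem pvAStep_hdr (n : String) (k : Bool) (d : List String) (p l : String)
    (h1 : ¬ PySem.Str.startswith (PySem.Str.strip l) "# Skill:" = true)
    (h2 : ¬ PySem.Str.startswith (PySem.Str.strip l) "## When to Use" = true)
    (h3 : PySem.Str.startswith (PySem.Str.strip l) "##" = true) :
    pvAStep (n, k, d, p) l = (n, false, d, p) := by
  unfold pvAStep; rw [if_neg h1, if_neg h2, if_pos h3]

theorem pvAStep_body (n : String) (d : List String) (p l : String)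
    (h1 : ¬ PySem.Str.startswith (PySem.Str.strip l) "# Skill:" = true)
    (h2 : ¬ PySem.Str.startswith (PySem.Str.strip l) "## When to Use" = true)
    (h3 : ¬ PySem.Str.startswith (PySem.Str.strip l) "##" = true)
    (h4 : ¬ (PySem.Str.strip l == "") = true) :
    pvAStep (n, true, d, p) l = (n, true, d ++ [PySem.Str.strip l], p) := by
  unfold pvAStep
  rw [if_neg h1, if_neg h2, if_neg h3, if_pos (by simp at h4 ⊢; exact h4)]

theorem pvAStep_rest (n : String) (k : Bool) (d : List String) (p l : String)
    (h1 : ¬ PySem.Str.startswith (PySem.Str.strip l) "# Skill:" = true)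
    (h2 : ¬ PySem.Str.startswith (PySem.Str.strip l) "## When to Use" = true)
    (h3 : ¬ PySem.Str.startswith (PySem.Str.strip l) "##" = true)
    (h4 : ¬ (k && !(PySem.Str.strip l == "")) = true) :
    pvAStep (n, k, d, p) l = (n, k, d, pvPolLine p (PySem.Str.strip l)) := by
  unfold pvAStep pvPolLine
  rw [if_neg h1, if_neg h2, if_neg h3, if_neg h4]
  by_cases h5 : PySem.Str.startswith (PySem.Str.strip l) "Level:" = true
  · rw [if_pos h5, if_pos h5]
    cases PySem.Str.split₀ (PySem.Str.strip (PySem.Str.slice (PySem.Str.strip l) (some 6) none)) with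
    | nil => rfl
    | cons t ts => rfl
  · rw [if_neg h5, if_neg h5]

-- step lemmas for B's pass-1 loop body
theorem pvBStep_skill (t : List String) (k : Bool) (b : List String)
    (sg : List (Bool × List String)) (l : String)
    (h1 : PySem.Str.startswith (PySem.Str.strip l) "# Skill:" = true) :
    pvBStep (t, k, b, sg) l =
      (t ++ [PySem.Str.strip (PySem.Str.slice (PySem.Str.strip l) (some 8) none)], false, [],
       sg ++ [(k, b)]) := by
  unfold pvBStep; rw [if_pos h1]

theorem pvBStep_when (t : List String) (k : Bool) (b : List String)
    (sg : List (Bool × List String)) (l : String)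
    (h1 : ¬ PySem.Str.startswith (PySem.Str.strip l) "# Skill:" = true)
    (h2 : PySem.Str.startswith (PySem.Str.strip l) "## When to Use" = true) :
    pvBStep (t, k, b, sg) l = (t, true, [], sg ++ [(k, b)]) := by
  unfold pvBStep; rw [if_neg h1, if_pos h2]

theorem pvBStep_hdr (t : List String) (k : Bool) (b : List String)
    (sg : List (Bool × List String)) (l : String)
    (h1 : ¬ PySem.Str.startswith (PySem.Str.strip l) "# Skill:" = true)
    (h2 : ¬ PySem.Str.startswith (PySem.Str.strip l) "## When to Use" = true)
    (h3 : PySem.Str.startswith (PySem.Str.strip l) "##" = true) :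
    pvBStep (t, k, b, sg) l = (t, false, [], sg ++ [(k, b)]) := by
  unfold pvBStep; rw [if_neg h1, if_neg h2, if_pos h3]

theorem pvBStep_body (t : List String) (k : Bool) (b : List String)
    (sg : List (Bool × List String)) (l : String)
    (h1 : ¬ PySem.Str.startswith (PySem.Str.strip l) "# Skill:" = true)
    (h2 : ¬ PySem.Str.startswith (PySem.Str.strip l) "## When to Use" = true)
    (h3 : ¬ PySem.Str.startswith (PySem.Str.strip l) "##" = true)
    (h4 : ¬ (PySem.Str.strip l == "") = true) :
    pvBStep (t, k, b, sg) l = (t, k, b ++ [PySem.Str.strip l], sg) := by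
  unfold pvBStep
  rw [if_neg h1, if_neg h2, if_neg h3, if_pos (by simp at h4 ⊢; exact h4)]

theorem pvBStep_empty (t : List String) (k : Bool) (b : List String)
    (sg : List (Bool × List String)) (l : String)
    (h1 : ¬ PySem.Str.startswith (PySem.Str.strip l) "# Skill:" = true)
    (h2 : ¬ PySem.Str.startswith (PySem.Str.strip l) "## When to Use" = true)
    (h3 : ¬ PySem.Str.startswith (PySem.Str.strip l) "##" = true)
    (h4 : (PySem.Str.strip l == "") = true) :
    pvBStep (t, k, b, sg) l = (t, k, b, sg) := by
  unfold pvBStep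
  rw [if_neg h1, if_neg h2, if_neg h3, if_neg (by simp at h4 ⊢; simp [h4])]

-- the loop invariant: A's running state is what B's pass 2 extracts from B's pass-1 state
theorem pvInv (skill_id : String) (lines : List String)
    (titles : List String) (kind : Bool) (body : List String) (segs : List (Bool × List String))
    (name : String) (desc : List String) (pol : String)
    (hn : name = titles.getLast?.getD skill_id)
    (hd : desc = pvDesc (segs ++ [(kind, body)]))
    (hp : pol = (segs ++ [(kind, body)]).foldl pvPolSeg "ALLOW") :
    lines.foldl pvAStep (name, kind, desc, pol) =
      (let b := lines.foldl pvBStep (titles, kind, body, segs)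
       (b.1.getLast?.getD skill_id, b.2.1,
        pvDesc (b.2.2.2 ++ [(b.2.1, b.2.2.1)]),
        (b.2.2.2 ++ [(b.2.1, b.2.2.1)]).foldl pvPolSeg "ALLOW")) := by
  induction lines generalizing titles kind body segs name desc pol with
  | nil =>
    simp only [List.foldl_nil]
    exact Prod.ext hn (Prod.ext rfl (Prod.ext hd hp))
  | cons l rest ih =>
    simp only [List.foldl_cons]
    by_cases h1 : PySem.Str.startswith (PySem.Str.strip l) "# Skill:" = true
    · rw [pvAStep_skill _ _ _ _ _ h1, pvBStep_skill _ _ _ _ _ h1]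
      apply ih
      · simp
      · simp [hd, pvDesc]
      · simp [hp, List.foldl_append, pvPolSeg]
    · by_cases h2 : PySem.Str.startswith (PySem.Str.strip l) "## When to Use" = true
      · rw [pvAStep_when _ _ _ _ _ h1 h2, pvBStep_when _ _ _ _ _ h1 h2]
        apply ih
        · exact hn
        · simp [hd, pvDesc]
        · simp [hp, List.foldl_append, pvPolSeg]
      · by_cases h3 : PySem.Str.startswith (PySem.Str.strip l) "##" = true
        · rw [pvAStep_hdr _ _ _ _ _ h1 h2 h3, pvBStep_hdr _ _ _ _ _ h1 h2 h3]
          apply ih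
          · exact hn
          · simp [hd, pvDesc]
          · simp [hp, List.foldl_append, pvPolSeg]
        · by_cases h4 : (PySem.Str.strip l == "") = true
          · -- blank line: both loops keep their state; A's Level: test fails on ""
            have hs : PySem.Str.strip l = "" := by simpa using h4
            rw [pvBStep_empty _ _ _ _ _ h1 h2 h3 h4,
              pvAStep_rest _ _ _ _ _ h1 h2 h3 (by simp [h4]), hs]
            have hpl : pvPolLine pol "" = pol := rfl
            rw [hpl]
            exact ih _ _ _ _ _ _ _ hn hd hp
          · -- non-blank body line
            rw [pvBStep_body _ _ _ _ _ h1 h2 h3 h4]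
            cases kind with
            | true =>
              rw [pvAStep_body _ _ _ _ h1 h2 h3 h4]
              apply ih
              · exact hn
              · simp [hd, pvDesc]
              · simp [hp, List.foldl_append, pvPolSeg]
            | false =>
              rw [pvAStep_rest _ _ _ _ _ h1 h2 h3 (by simp)]
              apply ih
              · exact hn
              · simp [hd, pvDesc]
              · simp [hp, List.foldl_append, pvPolSeg]

-- ===== VERDICT (by name: the statement is the Claim_ definition above) =====
theorem parse_skill_frontmatter_py_spec : Claim_equal_parse_skill_frontmatter_py := by
  intro skill_id content _ _
  unfold Spec_parse_skill_frontmatter_py parse_skill_frontmatter_py parse_skill_frontmatter_py_alt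
  have h := pvInv skill_id (PySem.Str.splitlines content) [] false [] [] skill_id [] "ALLOW"
    rfl rfl rfl
  simp only [h, pvDesc]
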